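-- pv_equiv track=rewrite | github.com/v-t-9/PythonPuzzles | ex55.py | odd_first_and_last
-- ===== SOURCE A (Python) =====
-- def odd_first_and_last(l):
--     d = []
--     odd = []
--     res = []
--     x = []
--     for i in l:
--         if i > 10:
--             d.append(list(map(int, str(i))))
--     for i in d:
--         if i[0] % 2 != 0 and i[len(i)-1] % 2 !=0 :
--             odd.append(list(map(str, i)))
--     x = [''.join([str(j) for j in i]) for i in odd]
--
--     res = [int(i) for i in x]
--     return res
-- ===== SOURCE B (Python) =====
-- def odd_first_and_last(l):
--     res = []
--     for i in l:
--         if i > 10 and i % 10 % 2 == 1: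
--             n = i
--             while n >= 10:
--                 n //= 10
--             if n % 2 == 1:
--                 res.append(i)
--     return res
-- ===== Notes on version B (the rewrite author's own statement) =====
-- stated objective: simpler
-- what changed: B replaces A's three sequential passes through string conversions (str(i) -> digit list -> str list -> ''.join -> int) by a single arithmetic pass that keeps i when i > 10, i % 10 is odd, and the leading digit (obtained by repeated floor division by 10) is odd.
import Mathlib
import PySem

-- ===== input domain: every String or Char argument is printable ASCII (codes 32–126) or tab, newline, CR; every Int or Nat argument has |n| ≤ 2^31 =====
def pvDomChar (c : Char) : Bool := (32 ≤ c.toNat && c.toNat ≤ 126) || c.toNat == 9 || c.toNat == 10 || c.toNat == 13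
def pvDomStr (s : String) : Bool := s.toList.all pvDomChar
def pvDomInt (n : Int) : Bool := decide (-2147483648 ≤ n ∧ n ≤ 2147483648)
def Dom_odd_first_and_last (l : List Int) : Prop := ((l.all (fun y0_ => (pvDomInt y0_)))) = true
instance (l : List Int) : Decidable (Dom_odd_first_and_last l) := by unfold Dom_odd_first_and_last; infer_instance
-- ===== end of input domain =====

-- B replaces A's three passes through strings (str → digit list → str list → join → int) by one
-- arithmetic pass that tests i % 10 and the leading digit obtained by repeated floor division (objective: simpler).


-- ===== PORT A =====
-- int(c) for one character of str(i): exact here, since A applies it only to the digit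
-- characters of str(i) with i > 10, where Python's int() returns (the getD branch is never taken)
def pvCharInt (c : Char) : Int := (PySem.Int.ofStr? (String.ofList [c])).getD 0

def odd_first_and_last (l : List Int) : List Int :=
  let d := l.foldl (fun d i =>
    if i > 10 then d ++ [(PySem.Int.toStr i).toList.map pvCharInt] else d) []
  let odd := d.foldl (fun odd i =>
    if PySem.Int.mod ((PySem.List.pyGet? i 0).getD 0) 2 ≠ 0 ∧
       PySem.Int.mod ((PySem.List.pyGet? i ((i.length : Int) - 1)).getD 0) 2 ≠ 0
    then odd ++ [i.map PySem.Int.toStr] else odd) []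
  -- ''.join([str(j) for j in i]): str(j) of a Python str j is j itself
  let x := odd.map (fun i => PySem.Str.join "" (i.map (fun j => j)))
  -- int(i) on a string of digits: exact, ofStr? returns some there (the getD branch is never taken)
  let res := x.map (fun i => (PySem.Int.ofStr? i).getD 0)
  res

-- ===== PORT B =====
-- while n >= 10: n //= 10  — ported with fuel; n.natAbs steps always suffice to fall below 10
def pvFirstDigit : Nat → Int → Int
  | 0, n => n
  | fuel+1, n => if n ≥ 10 then pvFirstDigit fuel (PySem.Int.floordiv n 10) else n

def odd_first_and_last_alt (l : List Int) : List Int :=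
  l.foldl (fun res i =>
    if i > 10 ∧ PySem.Int.mod (PySem.Int.mod i 10) 2 = 1 then
      (if PySem.Int.mod (pvFirstDigit i.natAbs i) 2 = 1 then res ++ [i] else res)
    else res) []

-- ===== PRECONDITION & SPEC =====
def Spec_odd_first_and_last (l : List Int) (out : List Int) : Prop := out = odd_first_and_last_alt l
instance (l : List Int) (out : List Int) : Decidable (Spec_odd_first_and_last l out) := by unfold Spec_odd_first_and_last; infer_instance

-- ===== CLAIM (what is proved, stated in full; the proofs are below) =====
def Claim_equal_odd_first_and_last : Prop := ∀ (l : List Int), Dom_odd_first_and_last l → Spec_odd_first_and_last l (odd_first_and_last l)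

-- ===== LEMMAS AND PROOFS =====

-- the leading decimal digit, as a recursive helper used only by the proofs
def pvLead (n : Nat) : Nat :=
  if n < 10 then n else pvLead (n / 10)
  termination_by n
  decreasing_by exact Nat.div_lt_self (by omega) (by omega)

-- capture PySem's private base-10 digit parser (digitsVal?.go) together with its defining equations
theorem pvCapture : ∃ g : List Char → Bool → ℕ → Option ℕ,
    (∀ s : List Char, PySem.Int.ofChars? s =
      (have cs := (List.dropWhile PySem.Int.isIntSpace (List.dropWhile PySem.Int.isIntSpace s).reverse).reverse
       match cs with
        | '-' :: ds => Option.map (fun n => -n) (do let a ← ((match ds with | [] => none | ds => g ds false 0) : Option ℕ); pure ((a : ℤ)))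
        | '+' :: ds => Option.map (fun n => n) (do let a ← ((match ds with | [] => none | ds => g ds false 0) : Option ℕ); pure ((a : ℤ)))
        | ds => Option.map (fun n => n) (do let a ← ((match ds with | [] => none | ds => g ds false 0) : Option ℕ); pure ((a : ℤ))))) ∧
    (∀ b a, g [] b a = if b then some a else none) ∧
    (∀ c r b a, g (c :: r) b a =
        if c.isDigit then g r true (a * 10 + (c.toNat - '0'.toNat))
        else if c = '_' ∧ b = true then
          (match r with
            | d :: _ => if d.isDigit then g r false a else none
            | [] => none)
        else none) :=
  ⟨_, fun s => rfl, fun b a => rfl, fun c r b a => rfl⟩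

-- the parser runs as a left fold on an all-digit list
theorem pvGoRun (g : List Char → Bool → ℕ → Option ℕ)
    (hnil : ∀ b a, g [] b a = if b then some a else none)
    (hcons : ∀ c r b a, g (c :: r) b a =
        if c.isDigit then g r true (a * 10 + (c.toNat - '0'.toNat))
        else if c = '_' ∧ b = true then
          (match r with
            | d :: _ => if d.isDigit then g r false a else none
            | [] => none)
        else none) :
    ∀ (ds : List Char) (b : Bool) (a : ℕ), ds ≠ [] → (∀ c ∈ ds, c.isDigit) →
      g ds b a = some (ds.foldl (fun acc c => acc * 10 + (c.toNat - '0'.toNat)) a) := by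
  intro ds
  induction ds with
  | nil => intro b a h; exact absurd rfl h
  | cons c r ih =>
    intro b a _ hd
    have hc : c.isDigit = true := hd c (by simp)
    rw [hcons, if_pos hc]
    cases r with
    | nil => rw [hnil]; simp [List.foldl]
    | cons c' r' =>
      rw [ih true _ (by simp) (fun x hx => hd x (by simp [hx]))]
      simp [List.foldl]

theorem pvFoldrVal (L : List ℕ) :
    L.foldr (fun d acc => acc * 10 + d) 0 = Nat.ofDigits 10 L := by
  induction L with
  | nil => simp [Nat.ofDigits]
  | cons d L ih => simp [List.foldr, Nat.ofDigits_cons, ih]; ring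

-- per-digit facts (d < 10)
theorem pvCharInt_digitChar (d : ℕ) (h : d < 10) : pvCharInt (Nat.digitChar d) = (d : Int) := by
  interval_cases d <;> decide

theorem pvIsDigit_digitChar (d : ℕ) (h : d < 10) : (Nat.digitChar d).isDigit = true := by
  interval_cases d <;> decide

theorem pvNotSpace_digitChar (d : ℕ) (h : d < 10) : PySem.Int.isIntSpace (Nat.digitChar d) = false := by
  interval_cases d <;> decide

theorem pvToNat_digitChar (d : ℕ) (h : d < 10) : (Nat.digitChar d).toNat - '0'.toNat = d := by
  interval_cases d <;> decide

theorem pvDropWhile_noSpace (xs : List Char) (h : ∀ c ∈ xs, PySem.Int.isIntSpace c = false) :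
    List.dropWhile PySem.Int.isIntSpace xs = xs := by
  cases xs with
  | nil => rfl
  | cons c r => rw [List.dropWhile_cons_of_neg]; simp [h c (by simp)]

theorem pvToDigitsCore_eq (fuel : ℕ) : ∀ (n : ℕ) (ds : List Char), 0 < n → n < 10 ^ fuel →
    Nat.toDigitsCore 10 fuel n ds = ((Nat.digits 10 n).reverse.map Nat.digitChar) ++ ds := by
  induction fuel with
  | zero => intro n ds h1 h2; omega
  | succ fuel ih =>
    intro n ds h1 h2
    rw [Nat.toDigitsCore]
    by_cases h10 : n / 10 = 0
    · have : n < 10 := by omega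
      rw [if_pos h10, Nat.digits_def' (by norm_num) h1, h10]
      simp [Nat.mod_eq_of_lt this]
    · rw [if_neg h10, ih (n / 10) _ (by omega) (by
        have := Nat.div_lt_self h1 (by norm_num : (1:ℕ) < 10)
        have h3 : n / 10 < 10 ^ fuel := by
          rw [Nat.div_lt_iff_lt_mul (by norm_num)]
          calc n < 10 ^ (fuel+1) := h2
          _ = 10 ^ fuel * 10 := by ring
        exact h3)]
      rw [Nat.digits_def' (by norm_num) h1]
      simp

theorem pvToChars_eq (n : ℕ) (h : 0 < n) :
    PySem.Int.toChars (n : Int) = (Nat.digits 10 n).reverse.map Nat.digitChar := by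
  rw [PySem.Int.toChars]
  rw [if_neg (by omega)]
  have : ((n : Int)).toNat = n := rfl
  rw [this, Nat.toDigits, pvToDigitsCore_eq (n+1) n [] h
    (lt_of_lt_of_le (Nat.lt_pow_self (by norm_num)) (Nat.pow_le_pow_right (by norm_num) (by omega)))]
  simp

-- int() round-trip on the digit string of a positive number
theorem pvRound (n : ℕ) (h : 0 < n) :
    PySem.Int.ofChars? ((Nat.digits 10 n).reverse.map Nat.digitChar) = some (n : Int) := by
  obtain ⟨g, hshell, hnil, hcons⟩ := pvCapture
  have hdig : ∀ d ∈ Nat.digits 10 n, d < 10 := fun d hd => Nat.digits_lt_base (by norm_num) hd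
  set L := Nat.digits 10 n with hLdef
  set ds := L.reverse.map Nat.digitChar with hds
  have hmem : ∀ c ∈ ds, ∃ d, d < 10 ∧ c = Nat.digitChar d := by
    intro c hc
    rw [hds] at hc
    simp only [List.mem_map, List.mem_reverse] at hc
    obtain ⟨d, hd, rfl⟩ := hc
    exact ⟨d, hdig d hd, rfl⟩
  have hnospace : ∀ c ∈ ds, PySem.Int.isIntSpace c = false := by
    intro c hc; obtain ⟨d, hd10, rfl⟩ := hmem c hc; exact pvNotSpace_digitChar d hd10
  have hisdig : ∀ c ∈ ds, c.isDigit := fun c hc => by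
    obtain ⟨d, hd10, rfl⟩ := hmem c hc; exact pvIsDigit_digitChar d hd10
  have hne : ds ≠ [] := by
    rw [hds]
    simp only [ne_eq, List.map_eq_nil_iff, List.reverse_eq_nil_iff]
    exact Nat.digits_ne_nil_iff_ne_zero.mpr (by omega)
  have hstrip : (List.dropWhile PySem.Int.isIntSpace (List.dropWhile PySem.Int.isIntSpace ds).reverse).reverse = ds := by
    rw [pvDropWhile_noSpace ds hnospace,
        pvDropWhile_noSpace _ (by intro c hc; exact hnospace c (by simpa using hc)),
        List.reverse_reverse]
  rw [hshell ds]
  simp only [hstrip]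
  obtain ⟨c, rest, hcr⟩ := List.exists_cons_of_ne_nil hne
  have hcd : c.isDigit = true := hisdig c (by rw [hcr]; simp)
  rw [hcr]
  have hval : (c :: rest).foldl (fun acc c => acc * 10 + (c.toNat - '0'.toNat)) 0 = n := by
    rw [← hcr, hds, List.foldl_map]
    rw [PySem.List.foldl_congr_mem L.reverse _ (fun a d => a * 10 + d) 0 (by
      intro acc x hx
      rw [List.mem_reverse] at hx
      simp only [pvToNat_digitChar x (hdig x hx)])]
    rw [List.foldl_reverse, pvFoldrVal, hLdef, Nat.ofDigits_digits]
  have hg := pvGoRun g hnil hcons (c :: rest) false 0 (by simp) (by rw [← hcr]; exact hisdig)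
  rw [hval] at hg
  -- reduce the outer 3-way match: c is a digit, hence neither '-' nor '+'
  split
  · rename_i ds' heq
    injection heq with h1 h2
    rw [h1] at hcd; simp at hcd
  · rename_i ds' heq
    injection heq with h1 h2
    rw [h1] at hcd; simp at hcd
  · rename_i heq1 heq2
    simp only [hg]
    rfl

theorem pvGetLast?_digits (n : ℕ) (h : 0 < n) :
    (Nat.digits 10 n).getLast? = some (pvLead n) := by
  induction n using Nat.strong_induction_on with
  | _ n ih =>
    rw [Nat.digits_def' (by norm_num : (1:ℕ) < 10) h, pvLead]
    by_cases h10 : n < 10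
    · have : n / 10 = 0 := by omega
      rw [if_pos h10, this]
      simp [Nat.mod_eq_of_lt h10]
    · rw [if_neg h10]
      have hpos : 0 < n / 10 := by omega
      have hne : Nat.digits 10 (n / 10) ≠ [] := Nat.digits_ne_nil_iff_ne_zero.mpr (by omega)
      obtain ⟨d, L, hL⟩ := List.exists_cons_of_ne_nil hne
      rw [hL, List.getLast?_cons_cons, ← hL]
      exact ih (n / 10) (Nat.div_lt_self h (by norm_num)) hpos

theorem pvFirstDigit_eq (fuel : ℕ) : ∀ (n : ℕ), 0 < n → n ≤ fuel →
    pvFirstDigit fuel (n : Int) = ((pvLead n : ℕ) : Int) := by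
  induction fuel with
  | zero => intro n h1 h2; omega
  | succ fuel ih =>
    intro n h1 h2
    rw [pvFirstDigit, pvLead]
    by_cases h10 : n < 10
    · rw [if_pos h10, if_neg (by exact_mod_cast (by omega : ¬ (10:Int) ≤ (n:Int)))]
    · rw [if_neg h10, if_pos (by exact_mod_cast (by omega : (10:Int) ≤ (n:Int))),
        (by norm_num : (10:Int) = ((10:ℕ):Int)), PySem.Int.floordiv_natCast]
      exact ih (n/10) (by omega) (by
        have := Nat.div_lt_self h1 (by norm_num : (1:ℕ) < 10); omega)


theorem pvDigitsLt (n : ℕ) : ∀ d ∈ (Nat.digits 10 n).reverse, d < 10 :=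
  fun d hd => Nat.digits_lt_base (by norm_num) (List.mem_reverse.mp hd)

theorem pvDigitsOf (i : Int) (hi : 10 < i) :
    (PySem.Int.toStr i).toList.map pvCharInt
      = (Nat.digits 10 i.toNat).reverse.map (fun d : ℕ => (d : Int)) := by
  have hn : ((i.toNat : ℕ) : Int) = i := Int.toNat_of_nonneg (by omega)
  conv_lhs => rw [PySem.Int.toList_toStr, ← hn]
  rw [pvToChars_eq _ (by omega), List.map_map]
  exact List.map_congr_left (fun d hd => pvCharInt_digitChar d (pvDigitsLt i.toNat d hd))

theorem pvToStr_digit (d : ℕ) (h : d < 10) :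
    PySem.Int.toStr (d : Int) = String.ofList [Nat.digitChar d] := by
  interval_cases d <;> decide

theorem pvRebuild (i : Int) (hi : 10 < i) :
    (PySem.Int.ofStr? (PySem.Str.join ""
      ((((PySem.Int.toStr i).toList.map pvCharInt).map PySem.Int.toStr).map (fun j => j)))).getD 0 = i := by
  rw [pvDigitsOf i hi, List.map_map, List.map_map]
  have hfun : (((fun (j : String) => j) ∘ PySem.Int.toStr) ∘ fun d : ℕ => (d : Int))
      = fun d : ℕ => PySem.Int.toStr (d : Int) := rfl
  rw [hfun]
  rw [List.map_congr_left (fun d hd => pvToStr_digit d (pvDigitsLt _ d hd))]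
  have hs : PySem.Str.join "" ((Nat.digits 10 i.toNat).reverse.map (fun d => String.ofList [Nat.digitChar d]))
      = String.ofList ((Nat.digits 10 i.toNat).reverse.map Nat.digitChar) := by
    apply String.toList_inj.mp
    rw [PySem.Str.toList_join, List.map_map]
    have h2 : (String.toList ∘ fun d : ℕ => String.ofList [Nat.digitChar d])
        = fun d : ℕ => [Nat.digitChar d] := by
      funext d; simp
    rw [h2]
    have h3 : ((Nat.digits 10 i.toNat).reverse.map (fun d => [Nat.digitChar d]))
        = ((Nat.digits 10 i.toNat).reverse.map Nat.digitChar).map (fun c => [c]) := by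
      rw [List.map_map]; rfl
    rw [h3]
    have h4 : ("" : String).toList = ([] : List Char) := rfl
    rw [h4, PySem.Chars.join_nil_singletons]
    simp
  rw [hs, PySem.Int.ofStr?_ofList, pvRound i.toNat (by omega)]
  simpa using Int.toNat_of_nonneg (by omega : (0:Int) ≤ i)

theorem pvHeadD (i : Int) (hi : 10 < i) :
    (PySem.List.pyGet? ((PySem.Int.toStr i).toList.map pvCharInt) 0).getD 0
      = ((pvLead i.toNat : ℕ) : Int) := by
  rw [pvDigitsOf i hi, PySem.List.pyGet?_zero]
  have h1 : ((Nat.digits 10 i.toNat).reverse.map (fun d : ℕ => (d : Int)))[0]?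
      = some ((pvLead i.toNat : ℕ) : Int) := by
    rw [← List.head?_eq_getElem?, List.head?_map, List.head?_reverse,
        pvGetLast?_digits _ (by omega)]
    rfl
  rw [h1]; rfl

theorem pvLastD (i : Int) (hi : 10 < i) :
    (PySem.List.pyGet? ((PySem.Int.toStr i).toList.map pvCharInt)
        (((((PySem.Int.toStr i).toList.map pvCharInt)).length : Int) - 1)).getD 0
      = ((i.toNat % 10 : ℕ) : Int) := by
  rw [pvDigitsOf i hi]
  set ds := (Nat.digits 10 i.toNat).reverse.map (fun d : ℕ => (d : Int)) with hds
  have hne : (Nat.digits 10 i.toNat) ≠ [] := Nat.digits_ne_nil_iff_ne_zero.mpr (by omega)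
  have hpos : 0 < ds.length := by
    rw [hds]; simp only [List.length_map, List.length_reverse]
    exact List.length_pos_of_ne_nil hne
  have hidx : ((ds.length : Int) - 1) = ((ds.length - 1 : ℕ) : Int) := by omega
  rw [hidx, PySem.List.pyGet?_natCast, ← List.getLast?_eq_getElem?]
  rw [hds, List.getLast?_map, List.getLast?_reverse,
      Nat.digits_def' (by norm_num : (1:ℕ) < 10) (by omega)]
  rfl

theorem pvCondIff (i : Int) (hi : 10 < i) :
    ((PySem.Int.mod ((PySem.List.pyGet? ((PySem.Int.toStr i).toList.map pvCharInt) 0).getD 0) 2 ≠ 0 ∧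
      PySem.Int.mod ((PySem.List.pyGet? ((PySem.Int.toStr i).toList.map pvCharInt)
        (((((PySem.Int.toStr i).toList.map pvCharInt)).length : Int) - 1)).getD 0) 2 ≠ 0)
     ↔ (PySem.Int.mod (PySem.Int.mod i 10) 2 = 1 ∧
        PySem.Int.mod (pvFirstDigit i.natAbs i) 2 = 1)) := by
  have hn : ((i.toNat : ℕ) : Int) = i := Int.toNat_of_nonneg (by omega)
  have hna : i.natAbs = i.toNat := by omega
  have hfd : pvFirstDigit i.natAbs i = ((pvLead i.toNat : ℕ) : Int) := by
    rw [hna]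
    conv_lhs => rw [← hn]
    exact pvFirstDigit_eq i.toNat i.toNat (by omega) (le_refl _)
  have e1 : ∀ m : ℕ, (PySem.Int.mod ((m : ℕ) : Int) 2 ≠ 0 ↔ m % 2 = 1) := by
    intro m
    have h : PySem.Int.mod ((m : ℕ) : Int) 2 = ((m % 2 : ℕ) : Int) := by
      exact_mod_cast PySem.Int.mod_natCast m 2
    rw [h]; omega
  have e2 : ∀ m : ℕ, (PySem.Int.mod ((m : ℕ) : Int) 2 = 1 ↔ m % 2 = 1) := by
    intro m
    have h : PySem.Int.mod ((m : ℕ) : Int) 2 = ((m % 2 : ℕ) : Int) := by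
      exact_mod_cast PySem.Int.mod_natCast m 2
    rw [h]; omega
  have e3 : PySem.Int.mod i 10 = ((i.toNat % 10 : ℕ) : Int) := by
    conv_lhs => rw [← hn]
    exact_mod_cast PySem.Int.mod_natCast i.toNat 10
  rw [pvHeadD i hi, pvLastD i hi, hfd, e3,
      e1 (pvLead i.toNat), e1 (i.toNat % 10), e2 (i.toNat % 10), e2 (pvLead i.toNat)]
  tauto

-- ===== VERDICT (by name: the statement is the Claim_ definition above) =====
theorem odd_first_and_last_spec : Claim_equal_odd_first_and_last := by
  intro l _
  unfold Spec_odd_first_and_last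
  simp only [odd_first_and_last, odd_first_and_last_alt]
  rw [PySem.List.foldl_append_ite (fun i : Int => i > 10)
        (fun i => (PySem.Int.toStr i).toList.map pvCharInt) l []]
  rw [PySem.List.foldl_append_ite
        (fun ds : List Int =>
          PySem.Int.mod ((PySem.List.pyGet? ds 0).getD 0) 2 ≠ 0 ∧
          PySem.Int.mod ((PySem.List.pyGet? ds ((ds.length : Int) - 1)).getD 0) 2 ≠ 0)
        (fun ds => ds.map PySem.Int.toStr) _ []]
  rw [PySem.List.foldl_congr_mem l _
        (fun res i => if (i > 10 ∧ PySem.Int.mod (PySem.Int.mod i 10) 2 = 1) ∧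
            PySem.Int.mod (pvFirstDigit i.natAbs i) 2 = 1 then res ++ [i] else res) []
        (by intro acc x _
            beta_reduce
            by_cases h1 : x > 10 ∧ PySem.Int.mod (PySem.Int.mod x 10) 2 = 1 <;>
              by_cases h2 : PySem.Int.mod (pvFirstDigit x.natAbs x) 2 = 1
            · rw [if_pos h1, if_pos h2, if_pos ⟨h1, h2⟩]
            · rw [if_pos h1, if_neg h2, if_neg (by tauto)]
            · rw [if_neg h1, if_neg (by tauto)]
            · rw [if_neg h1, if_neg (by tauto)])]
  rw [PySem.List.foldl_append_ite_eq_filter]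
  simp only [List.nil_append, List.filter_map, List.map_map]
  rw [List.filter_filter]
  rw [List.map_congr_left (g := fun i : Int => i) (by
      intro x hx
      have hx10 : x > 10 := by
        have := (List.mem_filter.mp hx).2
        simp only [Bool.and_eq_true, decide_eq_true_eq] at this
        exact this.2
      simpa using pvRebuild x hx10)]
  rw [List.map_id']
  apply List.filter_congr
  intro x _
  by_cases hx : 10 < x
  · simp only [Function.comp_apply, ← Bool.decide_and, decide_eq_decide]
    constructor
    · rintro ⟨hq, _⟩
      exact ⟨⟨hx, ((pvCondIff x hx).mp hq).1⟩, ((pvCondIff x hx).mp hq).2⟩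
    · rintro ⟨⟨_, h1⟩, h2⟩
      exact ⟨(pvCondIff x hx).mpr ⟨h1, h2⟩, hx⟩
  · simp only [Function.comp_apply, ← Bool.decide_and, decide_eq_decide]
    constructor
    · rintro ⟨_, h⟩; exact absurd h hx
    · rintro ⟨⟨h, _⟩, _⟩; exact absurd h hx
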